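-- pv_equiv track=rewrite | github.com/naixsu/Advent-of-Code | 2024/day_15/part_2.py | get_maze_hash
-- ===== SOURCE A (Python) =====
-- def get_maze_hash(maze: list[list[str]]) -> dict:
--     maze_hash = {}
--
--     for j, line in enumerate(maze):
--         for i, char in enumerate(line):
--
--             if char not in maze_hash:
--                 maze_hash[char] = [(j, i)]
--             else:
--                 maze_hash[char].append((j, i))
--
--
--     return maze_hash
-- ===== SOURCE B (Python) =====
-- def get_maze_hash(maze: list[list[str]]) -> dict:
--     # Materialize all (char, position) pairs, dedup the chars in first-seen
--     # order, then build the dict with one filtering pass per distinct char.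
--     flat = [(char, (j, i)) for j, line in enumerate(maze) for i, char in enumerate(line)]
--     keys = dict.fromkeys(ch for ch, _ in flat)
--     return {c: [pos for ch, pos in flat if ch == c] for c in keys}
-- ===== Notes on version B (the rewrite author's own statement) =====
-- stated objective: alternative
-- what changed: Replaces the scan-and-accumulate-into-dict-buckets loop by materializing a flat (char, position) list, deduplicating the chars in first-occurrence order, and building the dict with one filtering pass per distinct char.
import Mathlib
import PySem

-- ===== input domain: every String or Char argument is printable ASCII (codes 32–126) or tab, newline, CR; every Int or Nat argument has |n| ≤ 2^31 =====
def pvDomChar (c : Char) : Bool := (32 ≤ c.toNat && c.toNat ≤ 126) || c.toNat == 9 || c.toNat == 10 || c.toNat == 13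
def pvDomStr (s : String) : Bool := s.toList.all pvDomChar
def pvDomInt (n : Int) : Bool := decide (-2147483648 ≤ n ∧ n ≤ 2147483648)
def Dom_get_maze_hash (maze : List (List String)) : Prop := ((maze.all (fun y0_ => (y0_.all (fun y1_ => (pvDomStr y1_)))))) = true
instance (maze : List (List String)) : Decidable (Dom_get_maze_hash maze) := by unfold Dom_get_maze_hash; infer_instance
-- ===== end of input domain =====

-- ===== PORT A =====
-- B differs from A: A accumulates positions into dict buckets in one scan;
-- B materializes a flat (char, position) list, dedups the chars, and filters per char.
def get_maze_hash (maze : List (List String)) : List (String × List (Int × Int)) :=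
  ((PySem.List.enumerate maze).foldl (fun h jl =>
    (PySem.List.enumerate jl.2).foldl (fun h ic =>
      if h.contains ic.2 = false then h.insert ic.2 [(jl.1, ic.1)]
      else h.modify ic.2 [] (fun l => l ++ [(jl.1, ic.1)])) h)
    (PySem.Dict.empty)).items

-- ===== PORT B =====
def get_maze_hash_alt (maze : List (List String)) : List (String × List (Int × Int)) :=
  let flat := (PySem.List.enumerate maze).flatMap (fun jl =>
    (PySem.List.enumerate jl.2).map (fun ic => (ic.2, (jl.1, ic.1))))
  (PySem.List.dedup (flat.map Prod.fst)).map (fun c =>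
    (c, (flat.filter (fun e => e.1 == c)).map Prod.snd))

-- ===== PRECONDITION & SPEC =====
def Spec_get_maze_hash (maze : List (List String)) (out : List (String × List (Int × Int))) : Prop := out = get_maze_hash_alt maze
instance (maze : List (List String)) (out : List (String × List (Int × Int))) : Decidable (Spec_get_maze_hash maze out) := by unfold Spec_get_maze_hash; infer_instance

-- ===== CLAIM (what is proved, stated in full; the proofs are below) =====
def Claim_equal_get_maze_hash : Prop := ∀ (maze : List (List String)), Dom_get_maze_hash maze → Spec_get_maze_hash maze (get_maze_hash maze)

-- ===== LEMMAS AND PROOFS =====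

-- A's branch (insert a fresh singleton / append to the bucket) is exactly Dict.modify.
lemma step_eq_modify (h : PySem.Dict String (List (Int × Int))) (c : String) (p : Int × Int) :
    (if h.contains c = false then h.insert c [p] else h.modify c [] (fun l => l ++ [p]))
      = h.modify c [] (fun l => l ++ [p]) := by
  by_cases hc : h.contains c = false
  · simp [hc, PySem.Dict.insert, PySem.Dict.modify, PySem.Dict.getD_of_not_contains (h := hc)]
  · simp [hc]

-- A's nested fold is the fold of the modify step over the flattened pair list.
lemma foldA_eq_flat (maze : List (List String)) (d : PySem.Dict String (List (Int × Int))) :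
    (PySem.List.enumerate maze).foldl (fun h jl =>
      (PySem.List.enumerate jl.2).foldl (fun h ic =>
        if h.contains ic.2 = false then h.insert ic.2 [(jl.1, ic.1)]
        else h.modify ic.2 [] (fun l => l ++ [(jl.1, ic.1)])) h) d
    = ((PySem.List.enumerate maze).flatMap (fun jl =>
        (PySem.List.enumerate jl.2).map (fun ic => (ic.2, (jl.1, ic.1))))).foldl
        (fun h e => h.modify e.1 [] (fun l => l ++ [e.2])) d := by
  simp only [step_eq_modify]
  induction PySem.List.enumerate maze generalizing d with
  | nil => rfl
  | cons x t ih => simp [List.flatMap_cons, List.foldl_append, List.foldl_map, ih]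

-- The modify-fold over any pair list, as an items list.
lemma items_fold_flat (flat : List (String × (Int × Int))) :
    ((flat.foldl (fun h e => h.modify e.1 [] (fun l => l ++ [e.2])) PySem.Dict.empty)).items
      = (PySem.List.dedup (flat.map Prod.fst)).map (fun c =>
          (c, (flat.filter (fun e => e.1 == c)).map Prod.snd)) := by
  have hk : ((flat.foldl (fun h e => h.modify e.1 [] (fun l => l ++ [e.2]))
      PySem.Dict.empty)).keys = PySem.Set.ofList (flat.map Prod.fst) := by
    rw [PySem.Dict.keys_foldl_modify_key (key := Prod.fst)
      (f := fun _ e => (fun l => l ++ [e.2])) (d := PySem.Dict.empty)]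
    simp [PySem.Dict.keys_empty, PySem.Set.update, PySem.Set.ofList_eq_foldl]
  have hnd : ((flat.foldl (fun h e => h.modify e.1 [] (fun l => l ++ [e.2]))
      PySem.Dict.empty)).keys.Nodup := by
    rw [hk]; exact PySem.Set.nodup_ofList _
  rw [PySem.Dict.items_eq_map_keys _ hnd [], hk]
  simp only [PySem.List.dedup_eq_ofList]
  refine List.map_congr_left (fun c hc => ?_)
  rw [PySem.Dict.getD_foldl_modify_append]
  simp [PySem.Dict.getD_empty]

-- ===== VERDICT (by name: the statement is the Claim_ definition above) =====
theorem get_maze_hash_spec : Claim_equal_get_maze_hash := by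
  intro maze _
  show get_maze_hash maze = get_maze_hash_alt maze
  unfold get_maze_hash get_maze_hash_alt
  rw [foldA_eq_flat, items_fold_flat]
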